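-- pv_equiv track=rewrite | github.com/DOOMinikThunder/NNLangID | LanguageIdentification/src/DataSplit.py | split_by_languages
-- ===== SOURCE A (Python) =====
-- def split_by_languages(input):
-- 	idx = 0
-- 	end_of_list = len(input)-1
-- 	languages_splitted = {}
-- 	for tweet in input:
-- 		if tweet[2] in languages_splitted:
-- 			languages_splitted[tweet[2]].append(tweet)
-- 		else:
-- 			languages_splitted[tweet[2]] = [tweet]
-- 	return languages_splitted
-- ===== SOURCE B (Python) =====
-- def split_by_languages(input):
-- 	languages = dict.fromkeys(tweet[2] for tweet in input)
-- 	return {lang: [tweet for tweet in input if tweet[2] == lang] for lang in languages}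
-- ===== Notes on version B (the rewrite author's own statement) =====
-- stated objective: simpler
-- what changed: Replaces the single-pass dict bucketing (membership test + append-or-create per tweet) with a two-phase comprehension: dedup the language keys once, then build each group by filtering the input per key.
import Mathlib
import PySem

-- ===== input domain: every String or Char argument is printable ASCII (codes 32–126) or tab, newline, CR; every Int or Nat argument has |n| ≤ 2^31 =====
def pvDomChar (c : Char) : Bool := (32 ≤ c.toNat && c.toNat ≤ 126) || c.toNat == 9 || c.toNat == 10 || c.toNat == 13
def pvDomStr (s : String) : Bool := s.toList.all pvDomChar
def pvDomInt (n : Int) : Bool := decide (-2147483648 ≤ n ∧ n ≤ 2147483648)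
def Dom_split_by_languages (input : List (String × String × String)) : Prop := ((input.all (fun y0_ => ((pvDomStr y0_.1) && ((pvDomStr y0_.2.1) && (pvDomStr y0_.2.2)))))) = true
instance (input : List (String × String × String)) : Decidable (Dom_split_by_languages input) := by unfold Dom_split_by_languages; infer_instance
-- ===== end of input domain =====

-- B groups via a one-time key dedup followed by one filter per key, instead of A's single-pass
-- dict bucketing; same return value (first-occurrence key order, original order within groups).

-- ===== PORT A =====
-- A: for tweet in input: append to existing bucket or create [tweet]; return the dict (as items).
def split_by_languages (input : List (String × String × String)) : List (String × List (String × String × String)) :=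
  (input.foldl
    (fun d tweet =>
      if d.contains tweet.2.2 then
        d.modify tweet.2.2 [] (fun l => l ++ [tweet])
      else
        d.insert tweet.2.2 [tweet])
    (PySem.Dict.empty)).items

-- ===== PORT B =====
-- B: dedup the language keys (dict.fromkeys), then one filter of the input per key.
def split_by_languages_alt (input : List (String × String × String)) : List (String × List (String × String × String)) :=
  (PySem.List.dedup (input.map (fun tweet => tweet.2.2))).map
    (fun lang => (lang, input.filter (fun tweet => tweet.2.2 == lang)))

-- ===== PRECONDITION & SPEC =====
def Spec_split_by_languages (input : List (String × String × String)) (out : List (String × List (String × String × String))) : Prop := out = split_by_languages_alt input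
instance (input : List (String × String × String)) (out : List (String × List (String × String × String))) : Decidable (Spec_split_by_languages input out) := by unfold Spec_split_by_languages; infer_instance

-- ===== CLAIM (what is proved, stated in full; the proofs are below) =====
def Claim_equal_split_by_languages : Prop := ∀ (input : List (String × String × String)), Dom_split_by_languages input → Spec_split_by_languages input (split_by_languages input)

-- ===== LEMMAS AND PROOFS =====

-- A's branch (append to existing bucket / create singleton) is exactly 'modify key [] (· ++ [tweet])'.
theorem pv_step_eq (d : PySem.Dict String (List (String × String × String)))
    (t : String × String × String) :
    (if d.contains t.2.2 then d.modify t.2.2 [] (fun l => l ++ [t]) else d.insert t.2.2 [t])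
      = d.modify t.2.2 [] (fun l => l ++ [t]) := by
  by_cases h : d.contains t.2.2 = true
  · simp [h]
  · simp only [Bool.not_eq_true] at h
    simp only [PySem.Dict.insert, h, Bool.false_eq_true, reduceIte, PySem.Dict.modify,
      PySem.Dict.getD_of_not_contains, List.nil_append]

theorem pv_fold_eq (input : List (String × String × String)) :
    input.foldl
      (fun d tweet =>
        if d.contains tweet.2.2 then d.modify tweet.2.2 [] (fun l => l ++ [tweet])
        else d.insert tweet.2.2 [tweet]) PySem.Dict.empty
    = input.foldl (fun d tweet => d.modify tweet.2.2 [] (fun l => l ++ [tweet])) PySem.Dict.empty := by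
  apply PySem.List.foldl_congr_mem
  intro d t _
  exact pv_step_eq d t

-- ===== VERDICT (by name: the statement is the Claim_ definition above) =====
theorem split_by_languages_spec : Claim_equal_split_by_languages := by
  intro input _
  show _ = _
  unfold split_by_languages split_by_languages_alt
  rw [pv_fold_eq]
  have hnd : (input.foldl (fun d tweet => d.modify tweet.2.2 [] (fun l => l ++ [tweet]))
      PySem.Dict.empty).keys.Nodup :=
    PySem.Dict.nodup_keys_foldl_modify_key input (fun t => t.2.2) [] (fun d t l => l ++ [t])
      PySem.Dict.empty (by simp)
  rw [PySem.Dict.items_eq_map_keys _ hnd []]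
  rw [PySem.Dict.keys_foldl_modify_key]
  have hkeys : PySem.Set.update (PySem.Dict.empty
      (κ := String) (ν := List (String × String × String))).keys (input.map fun t => t.2.2)
      = PySem.List.dedup (input.map fun t => t.2.2) := by
    simp [PySem.Dict.keys_empty, PySem.Set.update, PySem.List.dedup_eq_ofList,
      PySem.Set.ofList_eq_foldl]
  rw [hkeys]
  apply List.map_congr_left
  intro k _
  congr 1
  have hfold : input.foldl (fun d tweet => d.modify tweet.2.2 [] (fun l => l ++ [tweet]))
      PySem.Dict.empty
      = (input.map (fun t => (t.2.2, t))).foldl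
          (fun d p => d.modify p.1 [] (fun l => l ++ [p.2])) PySem.Dict.empty := by
    rw [List.foldl_map]
  rw [hfold, PySem.Dict.getD_foldl_modify_append]
  simp [PySem.Dict.getD_empty, List.filter_map, Function.comp_def]
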